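-- pv_equiv track=rewrite | github.com/Silva0308/Python_seminars | SEM_5/02.py | range_num
-- ===== SOURCE A (Python) =====
-- def range_num(m_list):
--     ranged_list=[]
--     for i in range(len(m_list)):
--         f=m_list[i]
--         t_list=[f]
--         for x in range(i+1, len(m_list)):
--             if m_list[x] >f:
--                 f=m_list[x]
--                 t_list.append(f)
--         if len(t_list)>1:
--             ranged_list.append(t_list)
--     return ranged_list
-- ===== SOURCE B (Python) =====
-- def range_num(m_list):
--     # One right-to-left pass maintaining the record list of the current suffix.
--     rec = []
--     res = []
--     for v in reversed(m_list):
--         tail = rec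
--         while tail and tail[0] <= v:
--             tail = tail[1:]
--         rec = [v] + tail
--         if len(rec) > 1:
--             res.append(rec)
--     res.reverse()
--     return res
-- ===== Notes on version B (the rewrite author's own statement) =====
-- stated objective: alternative
-- what changed: B replaces A's nested forward scans (recomputing each suffix's running-maximum records from scratch) by a single right-to-left pass that maintains the record list of the current suffix via drop-smaller-then-cons.
import Mathlib
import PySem

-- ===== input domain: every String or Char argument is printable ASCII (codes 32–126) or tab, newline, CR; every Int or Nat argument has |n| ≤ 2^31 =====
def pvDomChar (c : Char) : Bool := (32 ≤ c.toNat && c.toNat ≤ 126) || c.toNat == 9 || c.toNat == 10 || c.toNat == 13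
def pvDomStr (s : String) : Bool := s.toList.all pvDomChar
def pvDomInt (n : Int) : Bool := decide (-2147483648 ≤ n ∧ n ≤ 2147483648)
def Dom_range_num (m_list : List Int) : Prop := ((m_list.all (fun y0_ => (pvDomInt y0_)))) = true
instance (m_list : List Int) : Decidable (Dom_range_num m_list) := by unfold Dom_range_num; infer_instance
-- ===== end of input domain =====

-- B: one right-to-left pass maintaining the suffix record list, instead of A's nested forward scans.


-- ===== PORT A =====
-- literal transliteration: outer loop over range(len), inner loop over range(i+1, len),
-- state (f, t_list); indices are always in range so getD's default is never read
def range_num (m_list : List Int) : List (List Int) :=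
  (List.range m_list.length).foldl (fun ranged_list i =>
    let f := m_list.getD i 0
    let st := (List.range' (i + 1) (m_list.length - (i + 1))).foldl
      (fun (p : Int × List Int) x =>
        if m_list.getD x 0 > p.1 then (m_list.getD x 0, p.2 ++ [m_list.getD x 0]) else p)
      (f, [f])
    if st.2.length > 1 then ranged_list ++ [st.2] else ranged_list) []

-- ===== PORT B =====
-- helper: the while-loop 'while tail and tail[0] <= v: tail = tail[1:]'
def dropLE (v : Int) : List Int → List Int
  | [] => []
  | h :: t => if h ≤ v then dropLE v t else h :: t

def range_num_alt (m_list : List Int) : List (List Int) :=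
  let st := m_list.reverse.foldl (fun (p : List Int × List (List Int)) v =>
      let rec_ := v :: dropLE v p.1
      (rec_, if rec_.length > 1 then p.2 ++ [rec_] else p.2)) ([], [])
  st.2.reverse

-- ===== PRECONDITION & SPEC =====
def Spec_range_num (m_list : List Int) (out : List (List Int)) : Prop := out = range_num_alt m_list
instance (m_list : List Int) (out : List (List Int)) : Decidable (Spec_range_num m_list out) := by unfold Spec_range_num; infer_instance

-- ===== CLAIM (what is proved, stated in full; the proofs are below) =====
def Claim_equal_range_num : Prop := ∀ (m_list : List Int), Dom_range_num m_list → Spec_range_num m_list (range_num m_list)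

-- ===== LEMMAS AND PROOFS =====

-- record list of a sequence, from the left (prefix maxima, strict records)
def records : List Int → List Int
  | [] => []
  | v :: t => v :: dropLE v (records t)

-- records seen after threshold f
def recFrom (f : Int) : List Int → List Int
  | [] => []
  | h :: t => if h > f then h :: recFrom h t else recFrom f t

def innerStep (m : List Int) (p : Int × List Int) (x : Nat) : Int × List Int :=
  if m.getD x 0 > p.1 then (m.getD x 0, p.2 ++ [m.getD x 0]) else p

def plainStep (p : Int × List Int) (h : Int) : Int × List Int :=
  if h > p.1 then (h, p.2 ++ [h]) else p

lemma fold_range'_drop (m : List Int) :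
    ∀ (k j : Nat) (p : Int × List Int), k = m.length - j →
    (List.range' j k).foldl (innerStep m) p = (m.drop j).foldl plainStep p := by
  intro k
  induction k with
  | zero =>
    intro j p hk
    have : m.length ≤ j := by omega
    simp [List.drop_eq_nil_of_le this]
  | succ k ih =>
    intro j p hk
    have hj : j < m.length := by omega
    have hdrop : m.drop j = m[j] :: m.drop (j + 1) := List.drop_eq_getElem_cons hj
    have hget : m.getD j 0 = m[j] := by
      simp [List.getD, List.getElem?_eq_getElem hj]
    rw [List.range'_succ, hdrop]
    simp only [List.foldl_cons]
    rw [ih (j + 1) _ (by omega)]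
    congr 1
    simp [innerStep, plainStep, List.getD, List.getElem?_eq_getElem hj]

lemma innerFold_snd (l : List Int) : ∀ (f : Int) (acc : List Int),
    (l.foldl plainStep (f, acc)).2 = acc ++ recFrom f l := by
  induction l with
  | nil => intro f acc; simp [recFrom]
  | cons h t ih =>
    intro f acc
    by_cases hc : h > f
    · simp [plainStep, recFrom, hc, ih]
    · simp [plainStep, recFrom, hc, ih]

lemma dropLE_dropLE {h v : Int} (hle : h ≤ v) (l : List Int) :
    dropLE v (dropLE h l) = dropLE v l := by
  induction l with
  | nil => rfl
  | cons x t ih =>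
    by_cases hx : x ≤ h
    · simp [dropLE, hx, le_trans hx hle, ih]
    · simp [dropLE, hx]

lemma recFrom_eq_dropLE_records (l : List Int) : ∀ v, recFrom v l = dropLE v (records l) := by
  induction l with
  | nil => intro v; rfl
  | cons h t ih =>
    intro v
    by_cases hc : h > v
    · simp [recFrom, records, dropLE, hc, not_le.mpr hc, ih]
    · have hle : h ≤ v := not_lt.mp hc
      simp [recFrom, records, dropLE, hc, hle, ih, dropLE_dropLE hle]

-- A's t_list at index i equals records of the suffix starting at i
lemma tlist_eq_records (m : List Int) (i : Nat) (hi : i < m.length) :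
    ((List.range' (i + 1) (m.length - (i + 1))).foldl (innerStep m)
      (m.getD i 0, [m.getD i 0])).2 = records (m.drop i) := by
  rw [fold_range'_drop m _ (i + 1) _ rfl, innerFold_snd]
  have hdrop : m.drop i = m[i] :: m.drop (i + 1) := List.drop_eq_getElem_cons hi
  have hget : m.getD i 0 = m[i] := by
    simp [List.getD, List.getElem?_eq_getElem hi]
  rw [hdrop, records, recFrom_eq_dropLE_records, hget]
  rfl

-- generic shape of A's outer loop
lemma foldl_filter_shape (T : Nat → List Int) (l : List Nat) :
    ∀ acc : List (List Int),
    l.foldl (fun a i => if (T i).length > 1 then a ++ [T i] else a) acc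
      = acc ++ (l.filter (fun i => (T i).length > 1)).map T := by
  induction l with
  | nil => intro acc; simp
  | cons h t ih =>
    intro acc
    by_cases hc : (T h).length > 1
    · simp [hc, ih]
    · simp [hc, ih]

-- the forward specification both programs compute
def specFwd : List Int → List (List Int)
  | [] => []
  | v :: t =>
      (if (records (v :: t)).length > 1 then [records (v :: t)] else []) ++ specFwd t

lemma A_eq_specFwd (m : List Int) : range_num m = specFwd m := by
  have key : ∀ i, i < m.length →
      ((List.range' (i + 1) (m.length - (i + 1))).foldl (innerStep m)
        (m.getD i 0, [m.getD i 0])).2 = records (m.drop i) := tlist_eq_records m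
  -- rewrite range_num as a filter/map over List.range
  have h1 : range_num m
      = ((List.range m.length).filter
          (fun i => (records (m.drop i)).length > 1)).map (fun i => records (m.drop i)) := by
    unfold range_num
    have h2 : (List.range m.length).foldl (fun ranged_list i =>
        let f := m.getD i 0
        let st := (List.range' (i + 1) (m.length - (i + 1))).foldl
          (fun (p : Int × List Int) x =>
            if m.getD x 0 > p.1 then (m.getD x 0, p.2 ++ [m.getD x 0]) else p)
          (f, [f])
        if st.2.length > 1 then ranged_list ++ [st.2] else ranged_list) []
      = (List.range m.length).foldl (fun ranged_list i =>
          if (records (m.drop i)).length > 1 then ranged_list ++ [records (m.drop i)]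
          else ranged_list) [] := by
      apply PySem.List.foldl_congr_mem
      intro acc i hi
      have hil : i < m.length := List.mem_range.mp hi
      simp only
      rw [show (fun (p : Int × List Int) x =>
            if m.getD x 0 > p.1 then (m.getD x 0, p.2 ++ [m.getD x 0]) else p) = innerStep m
          from rfl, key i hil]
    rw [h2, foldl_filter_shape (fun i => records (m.drop i)) (List.range m.length) []]
    simp
  rw [h1]
  clear h1 key
  induction m with
  | nil => simp [specFwd]
  | cons v t ih =>
    rw [specFwd, List.length_cons, List.range_succ_eq_map, List.filter_cons]
    by_cases hc : (records (v :: t)).length > 1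
    · rw [if_pos (by simpa using hc), List.map_cons, List.filter_map, List.map_map,
        List.drop_zero]
      simp only [Function.comp_def, List.drop_succ_cons]
      simp [hc, ih]
    · rw [if_neg (by simpa using hc), List.filter_map, List.map_map]
      simp only [Function.comp_def, List.drop_succ_cons]
      simp [hc, ih]

-- B's state invariant
def specRev : List Int → List (List Int)
  | [] => []
  | v :: t =>
      if (records (v :: t)).length > 1 then specRev t ++ [records (v :: t)] else specRev t

def bStep (p : List Int × List (List Int)) (v : Int) : List Int × List (List Int) :=
  let rec_ := v :: dropLE v p.1
  (rec_, if rec_.length > 1 then p.2 ++ [rec_] else p.2)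

lemma B_inv (m : List Int) :
    m.reverse.foldl bStep ([], []) = (records m, specRev m) := by
  induction m with
  | nil => rfl
  | cons v t ih =>
    rw [show (v :: t).reverse = t.reverse ++ [v] by simp, List.foldl_append, ih]
    simp [bStep, records, specRev]

lemma specRev_reverse (m : List Int) : (specRev m).reverse = specFwd m := by
  induction m with
  | nil => rfl
  | cons v t ih =>
    rw [specRev, specFwd]
    by_cases hc : (records (v :: t)).length > 1
    · simp [hc, ih]
    · simp [hc, ih]

lemma B_eq_specFwd (m : List Int) : range_num_alt m = specFwd m := by
  unfold range_num_alt
  rw [show (fun (p : List Int × List (List Int)) v =>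
        let rec_ := v :: dropLE v p.1
        (rec_, if rec_.length > 1 then p.2 ++ [rec_] else p.2)) = bStep from rfl]
  rw [B_inv, specRev_reverse]

-- ===== VERDICT (by name: the statement is the Claim_ definition above) =====
theorem range_num_spec : Claim_equal_range_num := by
  intro m _
  unfold Spec_range_num
  rw [A_eq_specFwd, B_eq_specFwd]
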